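-- pv_equiv track=rewrite | github.com/monam2/Algorithms | algorithm/brute-force/prgs 17679 프렌즈4블록.py | solution
-- ===== SOURCE A (Python) =====
-- def solution(m, n, board):
--     arr = [] #전치행렬 arr 생성
--     for i in range(n):
--         a = []
--         for j in range(m):
--             a.append(board[j][i])
--         a.reverse() #내려오는 방향을 배열과동일시하기 위해 행렬 좌우반전
--         arr.append(a)
--
--     count = 0
--     while True:
--         will_rm = []
--         for i in range(n-1): #완전탐색 후 remove배열에 같은 쌍 넣기
--             for j in range(m-1):
--                 if arr[i][j]==arr[i+1][j]==arr[i][j+1]==arr[i+1][j+1] and arr[i][j] != 'X':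
--                     will_rm.append([i,j]) #X는 이미 제거된 블록이므로 제외
--                     will_rm.append([i,j+1])
--                     will_rm.append([i+1,j])
--                     will_rm.append([i+1,j+1])
--         if len(will_rm)==0: #같은 쌍이 없으면 종료
--             return count
--
--         for x,y in will_rm: #같은쌍 X로 변경, 중복은 pass함.
--             if arr[x][y]!='X':
--                 arr[x][y]='X'
--                 count += 1
--         for i in range(n-1,-1,-1): #역순으로(밑에서부터&우측에서부터)
--             for j in range(m-1,-1,-1): #X를 빼서 뒤로 append
--                 if arr[i][j]=='X':
--                     arr[i].pop(j)
--                     arr[i].append('X')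
-- ===== SOURCE B (Python) =====
-- def _marked(grid, mm, nn, r, c):
--     # does cell (r, c) belong to some qualifying 2x2 block?
--     for r2 in (r - 1, r):
--         for c2 in (c - 1, c):
--             if 0 <= r2 <= mm - 2 and 0 <= c2 <= nn - 2:
--                 v = grid[r2][c2]
--                 if v != 'X' and v == grid[r2 + 1][c2] == grid[r2][c2 + 1] == grid[r2 + 1][c2 + 1]:
--                     return True
--     return False
--
--
-- def solution(m, n, board):
--     # board kept in its original orientation; rounds rebuild the grid functionally
--     grid = [list(row[:max(n, 0)]) for row in board[:max(m, 0)]]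
--     mm = len(grid)
--     nn = len(grid[0]) if grid else 0
--     count = 0
--     while True:
--         marks = [[_marked(grid, mm, nn, r, c) for c in range(nn)] for r in range(mm)]
--         total = sum(row.count(True) for row in marks)
--         if total == 0:
--             return count
--         count += total
--         newcols = []
--         for c in range(nn):
--             kept = [grid[r][c] for r in range(mm)
--                     if grid[r][c] != 'X' and not marks[r][c]]
--             newcols.append(['X'] * (mm - len(kept)) + kept)
--         grid = [[newcols[c][r] for c in range(nn)] for r in range(mm)]
-- ===== Notes on version B (the rewrite author's own statement) =====
-- stated objective: alternative
-- what changed: B keeps the board in its original row-major orientation and plays each round functionally: a per-cell 'belongs to a qualifying 2x2 block' predicate replaces A's coordinate list with dedup-by-mutation, and each column is rebuilt in one pass as X-padding over the surviving cells, replacing A's transposed-and-reversed mutable columns with in-place 'X' writes and pop/append gravity loops.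
import Mathlib
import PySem

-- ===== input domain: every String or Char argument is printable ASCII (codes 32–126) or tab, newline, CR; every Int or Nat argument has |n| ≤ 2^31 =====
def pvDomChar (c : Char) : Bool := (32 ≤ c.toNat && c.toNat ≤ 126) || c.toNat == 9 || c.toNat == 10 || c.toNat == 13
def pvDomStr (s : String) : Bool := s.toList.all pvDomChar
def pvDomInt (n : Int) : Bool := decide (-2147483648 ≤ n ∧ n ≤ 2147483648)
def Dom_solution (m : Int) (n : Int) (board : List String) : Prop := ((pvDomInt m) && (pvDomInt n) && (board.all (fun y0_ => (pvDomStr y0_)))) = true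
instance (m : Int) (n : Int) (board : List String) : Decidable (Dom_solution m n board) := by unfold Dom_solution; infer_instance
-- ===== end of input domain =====

-- B re-implements the 2x2-block elimination in the board's original orientation with
-- functional per-round rebuilds (per-cell membership predicate + column filter) instead
-- of A's transposed-and-reversed mutable columns, coordinate list and pop/append gravity;
-- objective: alternative (same asymptotic cost). Return-value equivalence only.

-- ===== PORT A =====
-- arr[i][j] read (indices are in range wherever Python A runs; default is never reached inside Pre_)
def pvIdx (g : List (List Char)) (i j : Int) : Char :=
  (PySem.List.pyGet? ((PySem.List.pyGet? g i).getD []) j).getD ' '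

-- board[j][i]
def pvRowGet (board : List String) (j i : Int) : Char :=
  (PySem.Str.pyGet? ((PySem.List.pyGet? board j).getD "") i).getD ' '

-- the transposed, per-column-reversed matrix A builds
def pvBuildArr (m n : Int) (board : List String) : List (List Char) :=
  (PySem.List.pyRange 0 n 1).foldl (fun arr i =>
    arr ++ [((PySem.List.pyRange 0 m 1).foldl (fun a j => a ++ [pvRowGet board j i]) []).reverse]) []

-- the will_rm list of one scan
def pvWillRm (m n : Int) (arr : List (List Char)) : List (Int × Int) :=
  (PySem.List.pyRange 0 (n-1) 1).foldl (fun wr i =>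
    (PySem.List.pyRange 0 (m-1) 1).foldl (fun wr j =>
      if pvIdx arr i j = pvIdx arr (i+1) j ∧ pvIdx arr i j = pvIdx arr i (j+1) ∧
         pvIdx arr i j = pvIdx arr (i+1) (j+1) ∧ pvIdx arr i j ≠ 'X'
      then wr ++ [(i, j), (i, j + 1), (i + 1, j), (i + 1, j + 1)]
      else wr) wr) []

-- the marking loop: arr[x][y] = 'X' when not yet 'X', counting
def pvMark (arr : List (List Char)) (count : Int) (wr : List (Int × Int)) :
    List (List Char) × Int :=
  wr.foldl (fun s p =>
    if pvIdx s.1 p.1 p.2 ≠ 'X'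
    then (PySem.List.pySetD s.1 p.1
            (PySem.List.pySetD ((PySem.List.pyGet? s.1 p.1).getD []) p.2 'X'), s.2 + 1)
    else s) (arr, count)

-- the gravity loops: arr[i].pop(j); arr[i].append('X'), i and j descending
def pvGrav (m n : Int) (arr : List (List Char)) : List (List Char) :=
  (PySem.List.pyRange (n-1) (-1) (-1)).foldl (fun arr i =>
    (PySem.List.pyRange (m-1) (-1) (-1)).foldl (fun arr j =>
      if pvIdx arr i j = 'X'
      then PySem.List.pySetD arr i
             ((((PySem.List.pop? ((PySem.List.pyGet? arr i).getD []) j).map Prod.snd).getD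
                 ((PySem.List.pyGet? arr i).getD [])) ++ ['X'])
      else arr) arr) arr

-- Python's 'while True' terminates (each pass with a nonempty will_rm turns at least one
-- non-'X' cell into 'X'); fuel m.toNat * n.toNat + 1 bounds the number of passes.
def pvLoopA (m n : Int) : Nat → List (List Char) → Int → Int
  | 0, _, count => count
  | fuel + 1, arr, count =>
    let wr := pvWillRm m n arr
    if wr = [] then count
    else
      let s := pvMark arr count wr
      pvLoopA m n fuel (pvGrav m n s.1) s.2

def solution (m : Int) (n : Int) (board : List String) : Int :=
  pvLoopA m n (m.toNat * n.toNat + 1) (pvBuildArr m n board) 0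

-- ===== PORT B =====
-- grid[r][c] read (row-major, original orientation)
def pvGetB (g : List (List Char)) (r c : Nat) : Char := (g.getD r []).getD c ' '

-- one qualifying 2x2 block with top-left corner (r, c)
def pvSame (g : List (List Char)) (r c : Nat) : Bool :=
  pvGetB g r c != 'X' && pvGetB g r c == pvGetB g (r+1) c &&
  pvGetB g r c == pvGetB g r (c+1) && pvGetB g r c == pvGetB g (r+1) (c+1)

-- _marked: cell (r, c) lies in some qualifying block; candidates r2 ∈ (r-1, r), c2 ∈ (c-1, c),
-- the 0 ≤ r2 / 0 ≤ c2 guards become the r = 0 / c = 0 skips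
def pvMarked (mm nn : Nat) (g : List (List Char)) (r c : Nat) : Bool :=
  ((if r = 0 then [] else [r - 1]) ++ [r]).any fun r2 =>
    ((if c = 0 then [] else [c - 1]) ++ [c]).any fun c2 =>
      decide (r2 + 2 ≤ mm) && decide (c2 + 2 ≤ nn) && pvSame g r2 c2

def pvMarks (mm nn : Nat) (g : List (List Char)) : List (List Bool) :=
  (List.range mm).map fun r => (List.range nn).map fun c => pvMarked mm nn g r c

-- [grid[r][c] for r in range(mm) if grid[r][c] != 'X' and not marks[r][c]]
def pvKept (mm : Nat) (g : List (List Char)) (marks : List (List Bool)) (c : Nat) : List Char :=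
  (List.range mm).filterMap fun r =>
    if pvGetB g r c ≠ 'X' ∧ (marks.getD r []).getD c false = false
    then some (pvGetB g r c) else none

-- rebuild: each column becomes 'X'-padding on top of its kept cells, re-rowed
def pvStepB (mm nn : Nat) (g : List (List Char)) (marks : List (List Bool)) :
    List (List Char) :=
  let newcols := (List.range nn).map fun c =>
    List.replicate (mm - (pvKept mm g marks c).length) 'X' ++ pvKept mm g marks c
  (List.range mm).map fun r => (List.range nn).map fun c => (newcols.getD c []).getD r ' '

-- Source B's 'while True' terminates the same way; the same fuel bounds its passes
def pvLoopB (mm nn : Nat) : Nat → List (List Char) → Int → Int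
  | 0, _, count => count
  | fuel + 1, g, count =>
    let marks := pvMarks mm nn g
    let total : Nat := (marks.map fun row => row.count true).sum
    if total = 0 then count
    else pvLoopB mm nn fuel (pvStepB mm nn g marks) (count + (total : Int))

def solution_alt (m : Int) (n : Int) (board : List String) : Int :=
  -- grid = [list(row[:max(n, 0)]) for row in board[:max(m, 0)]]
  let grid := (board.take m.toNat).map fun row => row.toList.take n.toNat
  pvLoopB grid.length (grid.headD []).length (m.toNat * n.toNat + 1) grid 0

-- ===== PRECONDITION & SPEC =====
-- Exactly where Python A returns: when n > 0 it indexes board[j][i] for j < m, i < n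
-- (n ≤ 0 runs no indexing at all); otherwise it raises IndexError.
def Pre_solution (m : Int) (n : Int) (board : List String) : Prop :=
  0 < n → (m.toNat ≤ board.length ∧ ∀ s ∈ board.take m.toNat, (n : Int) ≤ (s.toList.length : Int))
instance (m : Int) (n : Int) (board : List String) : Decidable (Pre_solution m n board) := by
  unfold Pre_solution; infer_instance

def pvWitness_solution : Int × Int × List String := (2, 2, ["aa", "aa"])

def Spec_solution (m : Int) (n : Int) (board : List String) (out : Int) : Prop :=
  out = solution_alt m n board
instance (m : Int) (n : Int) (board : List String) (out : Int) : Decidable (Spec_solution m n board out) := by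
  unfold Spec_solution; infer_instance

-- ===== CLAIM (what is proved, stated in full; the proofs are below) =====
def Claim_equal_solution : Prop := ∀ (m : Int) (n : Int) (board : List String),
  Dom_solution m n board → Pre_solution m n board → Spec_solution m n board (solution m n board)


-- ===== LEMMAS AND PROOFS =====

-- ---- proof-side definitions ----

-- shape: R rows, each of length C
def pvRect (g : List (List Char)) (R C : Nat) : Prop :=
  g.length = R ∧ ∀ row ∈ g, row.length = C

-- A's 2x2 condition at Nat coordinates (column i, height j of the transposed matrix)
def pvCond (arr : List (List Char)) (i j : Nat) : Prop :=
  pvGetB arr i j = pvGetB arr (i+1) j ∧ pvGetB arr i j = pvGetB arr i (j+1) ∧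
  pvGetB arr i j = pvGetB arr (i+1) (j+1) ∧ pvGetB arr i j ≠ 'X'

-- the simulation relation: arr is g transposed with every column reversed
def pvRel (M N : Nat) (g arr : List (List Char)) : Prop :=
  pvRect g M N ∧ pvRect arr N M ∧
  ∀ r c, r < M → c < N → pvGetB arr c (M - 1 - r) = pvGetB g r c

-- membership in some qualifying block, A side
def pvInBlock (M N : Nat) (arr : List (List Char)) (i j : Nat) : Prop :=
  ∃ i2 j2, i2 + 2 ≤ N ∧ j2 + 2 ≤ M ∧ pvCond arr i2 j2 ∧
    (i = i2 ∨ i = i2 + 1) ∧ (j = j2 ∨ j = j2 + 1)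

def pvBoxA (N M : Nat) : List (Nat × Nat) := (List.range N) ×ˢ (List.range M)

def pvColStep (col : List Char) (j : Int) : List Char :=
  if (PySem.List.pyGet? col j).getD ' ' = 'X'
  then (((PySem.List.pop? col j).map Prod.snd).getD col) ++ ['X'] else col

-- ---- small generic helpers ----

theorem pv_getD_set_ne {α : Type} (xs : List α) (i j : Nat) (v d : α) (h : i ≠ j) :
    (xs.set i v).getD j d = xs.getD j d := by
  simp [List.getD_eq_getElem?_getD, List.getElem?_set_ne h]

theorem pv_getD_set_self {α : Type} (xs : List α) (i : Nat) (v d : α) (h : i < xs.length) :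
    (xs.set i v).getD i d = v := by
  simp [List.getD_eq_getElem?_getD, List.getElem?_set_self h]

theorem pv_pySetD_natCast {α : Type} (xs : List α) (i : Nat) (v : α) :
    PySem.List.pySetD xs (i : Int) v = xs.set i v := by
  by_cases h : i < xs.length
  · simp [PySem.List.pySetD, PySem.List.pySet?, PySem.List.pyIdx?, h]
  · have h2 : xs.set i v = xs := List.set_eq_of_length_le (by omega)
    rw [h2]
    simp [PySem.List.pySetD, PySem.List.pySet?, PySem.List.pyIdx?, h]

theorem pv_filterMap_if {α β : Type} (P : α → Prop) [DecidablePred P] (f : α → β) (l : List α) :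
    (l.filterMap fun r => if P r then some (f r) else none)
      = (l.filter fun r => decide (P r)).map f := by
  induction l with
  | nil => rfl
  | cons a t ih => by_cases h : P a <;> simp [h, ih]

theorem pv_reverse_range (n : Nat) :
    (List.range n).reverse = (List.range n).map (fun k => n - 1 - k) := by
  apply List.ext_getElem
  · simp
  · intro i h1 h2
    simp [List.getElem_reverse]

theorem pv_countP_diff {α : Type} (l : List α) (P P' : α → Bool) (a : α)
    (hnd : l.Nodup) (ha : a ∈ l) (hP : P a = true) (hP' : P' a = false)
    (hq : ∀ b ∈ l, b ≠ a → P b = P' b) :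
    (l.filter P).length = (l.filter P').length + 1 := by
  induction l with
  | nil => cases ha
  | cons x t ih =>
    have hnd' : t.Nodup := hnd.of_cons
    by_cases hxa : x = a
    · subst hxa
      have hnotin : x ∉ t := (List.nodup_cons.mp hnd).1
      have hft : t.filter P = t.filter P' := by
        apply List.filter_congr
        intro b hb
        exact hq b (List.mem_cons_of_mem _ hb) (fun h => hnotin (h ▸ hb))
      simp [hP, hP', hft]
    · have hat : a ∈ t := by
        rcases List.mem_cons.mp ha with h | h
        · exact absurd h.symm hxa
        · exact h
      have hx := hq x List.mem_cons_self hxa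
      have ihh := ih hnd' hat (fun b hb hba => hq b (List.mem_cons_of_mem _ hb) hba)
      rw [List.filter_cons, List.filter_cons, ← hx]
      cases hPxv : P x <;> simp [ihh]

theorem pv_row_eq (x : List (List Char)) (R C : Nat) (hx : pvRect x R C) (i : Nat) (hi : i < R) :
    x.getD i [] = (List.range C).map (fun j => pvGetB x i j) := by
  obtain ⟨hlen, hrow⟩ := hx
  have hi' : i < x.length := by omega
  have hmem : x.getD i [] ∈ x := by
    rw [List.getD_eq_getElem?_getD, List.getElem?_eq_getElem hi']
    exact List.getElem_mem hi'
  apply List.ext_getElem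
  · rw [List.length_map, List.length_range]; exact hrow _ hmem
  · intro j h1 h2
    simp only [List.getElem_map, List.getElem_range, pvGetB]
    exact (List.getD_eq_getElem _ ' ' h1).symm

theorem pv_eraseIdx_mid (a c : List Char) (b : Char) :
    (a ++ b :: c).eraseIdx a.length = a ++ c := by
  induction a with
  | nil => rfl
  | cons x t ih => simp [ih]

-- ---- bridges between the ports' primitives and Nat-level views ----

theorem pvIdx_natCast (g : List (List Char)) (i j : Nat) :
    pvIdx g (i : Int) (j : Int) = pvGetB g i j := by
  simp [pvIdx, pvGetB, PySem.List.pyGet?_natCast, List.getD_eq_getElem?_getD]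

-- ---- A side: willRm ----

theorem pv_foldl_append_if_list {α β : Type} (p : α → Prop) [DecidablePred p] (q : α → List β)
    (l : List α) (acc : List β) :
    l.foldl (fun acc x => if p x then acc ++ q x else acc) acc
      = acc ++ l.flatMap (fun x => if p x then q x else []) := by
  have h : (fun (acc : List β) x => if p x then acc ++ q x else acc)
      = fun acc x => acc ++ (if p x then q x else []) := by
    funext acc x; split <;> simp
  rw [h, PySem.List.foldl_append_eq_flatMap]

theorem pv_condInt (arr : List (List Char)) (i j : Nat) :
    (pvIdx arr (i : Int) (j : Int) = pvIdx arr ((i : Int)+1) (j : Int) ∧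
     pvIdx arr (i : Int) (j : Int) = pvIdx arr (i : Int) ((j : Int)+1) ∧
     pvIdx arr (i : Int) (j : Int) = pvIdx arr ((i : Int)+1) ((j : Int)+1) ∧
     pvIdx arr (i : Int) (j : Int) ≠ 'X') ↔ pvCond arr i j := by
  simp only [← Nat.cast_add_one, pvIdx_natCast, pvCond]

theorem pv_willRm_flat (m n : Int) (arr : List (List Char)) :
    pvWillRm m n arr = (PySem.List.pyRange 0 (n-1) 1).flatMap (fun i =>
      (PySem.List.pyRange 0 (m-1) 1).flatMap (fun j =>
        if pvIdx arr i j = pvIdx arr (i+1) j ∧ pvIdx arr i j = pvIdx arr i (j+1) ∧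
           pvIdx arr i j = pvIdx arr (i+1) (j+1) ∧ pvIdx arr i j ≠ 'X'
        then [(i, j), (i, j + 1), (i + 1, j), (i + 1, j + 1)]
        else [])) := by
  unfold pvWillRm
  simp only [pv_foldl_append_if_list, PySem.List.foldl_append_eq_flatMap, List.nil_append]

theorem pv_mem_willRm (m n : Int) (M N : Nat) (hm : m = (M : Int)) (hn : n = (N : Int))
    (arr : List (List Char)) (p : Int × Int) :
    p ∈ pvWillRm m n arr ↔ ∃ i j : Nat, p = ((i : Int), (j : Int)) ∧ pvInBlock M N arr i j := by
  subst hm hn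
  rw [pv_willRm_flat]
  simp only [List.mem_flatMap, PySem.List.mem_pyRange_one]
  constructor
  · rintro ⟨iz, ⟨h0i, h1i⟩, jz, ⟨h0j, h1j⟩, hp⟩
    lift iz to Nat using h0i with i2
    lift jz to Nat using h0j with j2
    by_cases hc : (pvIdx arr (i2 : Int) (j2 : Int) = pvIdx arr ((i2 : Int)+1) (j2 : Int) ∧
       pvIdx arr (i2 : Int) (j2 : Int) = pvIdx arr (i2 : Int) ((j2 : Int)+1) ∧
       pvIdx arr (i2 : Int) (j2 : Int) = pvIdx arr ((i2 : Int)+1) ((j2 : Int)+1) ∧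
       pvIdx arr (i2 : Int) (j2 : Int) ≠ 'X')
    swap
    · rw [if_neg hc] at hp; cases hp
    rw [if_pos hc] at hp
    rw [pv_condInt] at hc
    have hN2 : i2 + 2 ≤ N := by omega
    have hM2 : j2 + 2 ≤ M := by omega
    simp only [List.mem_cons, List.not_mem_nil, or_false] at hp
    rcases hp with rfl | rfl | rfl | rfl
    · exact ⟨i2, j2, rfl, i2, j2, hN2, hM2, hc, Or.inl rfl, Or.inl rfl⟩
    · exact ⟨i2, j2 + 1, by push_cast; rfl, i2, j2, hN2, hM2, hc, Or.inl rfl, Or.inr rfl⟩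
    · exact ⟨i2 + 1, j2, by push_cast; rfl, i2, j2, hN2, hM2, hc, Or.inr rfl, Or.inl rfl⟩
    · exact ⟨i2 + 1, j2 + 1, by push_cast; rfl, i2, j2, hN2, hM2, hc, Or.inr rfl, Or.inr rfl⟩
  · rintro ⟨i, j, rfl, i2, j2, hN2, hM2, hc, hi, hj⟩
    refine ⟨(i2 : Int), ⟨by omega, by omega⟩, (j2 : Int), ⟨by omega, by omega⟩, ?_⟩
    rw [if_pos ((pv_condInt arr i2 j2).mpr hc)]
    rcases hi with rfl | rfl <;> rcases hj with rfl | rfl <;>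
      simp only [List.mem_cons, Prod.mk.injEq] <;> push_cast <;> tauto

theorem pv_willRm_nil (m n : Int) (M N : Nat) (hm : m = (M : Int)) (hn : n = (N : Int))
    (arr : List (List Char)) :
    pvWillRm m n arr = [] ↔ ¬ ∃ i2 j2, i2 + 2 ≤ N ∧ j2 + 2 ≤ M ∧ pvCond arr i2 j2 := by
  rw [List.eq_nil_iff_forall_not_mem]
  constructor
  · rintro h ⟨i2, j2, hN2, hM2, hc⟩
    exact h ((i2 : Int), (j2 : Int)) ((pv_mem_willRm m n M N hm hn arr _).mpr
      ⟨i2, j2, rfl, i2, j2, hN2, hM2, hc, Or.inl rfl, Or.inl rfl⟩)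
  · rintro h p hp
    obtain ⟨i, j, rfl, i2, j2, hN2, hM2, hc, _, _⟩ := (pv_mem_willRm m n M N hm hn arr _).mp hp
    exact h ⟨i2, j2, hN2, hM2, hc⟩

theorem pv_inBlock_nonX (M N : Nat) (arr : List (List Char)) (i j : Nat)
    (h : pvInBlock M N arr i j) : pvGetB arr i j ≠ 'X' := by
  obtain ⟨i2, j2, _, _, ⟨h1, h2, h3, h4⟩, hi, hj⟩ := h
  rcases hi with rfl | rfl <;> rcases hj with rfl | rfl
  · exact h4
  · rw [← h2]; exact h4
  · rw [← h1]; exact h4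
  · rw [← h3]; exact h4

-- ---- B side: marked ----

theorem pv_cand_mem (r x : Nat) :
    (x ∈ (if r = 0 then [] else [r - 1]) ++ [r]) ↔ (x = r ∨ x + 1 = r) := by
  by_cases hr0 : r = 0
  · subst hr0; simp
  · simp only [if_neg hr0, List.mem_append, List.mem_singleton]
    omega

theorem pv_marked_iff (M N : Nat) (g : List (List Char)) (r c : Nat) :
    pvMarked M N g r c = true ↔ ∃ r2 c2, (r2 = r ∨ r2 + 1 = r) ∧ (c2 = c ∨ c2 + 1 = c) ∧
      r2 + 2 ≤ M ∧ c2 + 2 ≤ N ∧ pvSame g r2 c2 = true := by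
  simp only [pvMarked, List.any_eq_true, Bool.and_eq_true, decide_eq_true_eq]
  constructor
  · rintro ⟨r2, hr2, c2, hc2, ⟨hb1, hb2⟩, hs⟩
    exact ⟨r2, c2, (pv_cand_mem r r2).mp hr2, (pv_cand_mem c c2).mp hc2, hb1, hb2, hs⟩
  · rintro ⟨r2, c2, hr2, hc2, hb1, hb2, hs⟩
    exact ⟨r2, (pv_cand_mem r r2).mpr hr2, c2, (pv_cand_mem c c2).mpr hc2, ⟨hb1, hb2⟩, hs⟩

theorem pv_same_iff (M N : Nat) (g arr : List (List Char)) (hRel : pvRel M N g arr)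
    (r c : Nat) (hr : r + 2 ≤ M) (hc : c + 2 ≤ N) :
    pvSame g r c = true ↔ pvCond arr c (M - 2 - r) := by
  obtain ⟨hg, ha, hcell⟩ := hRel
  have e1 : pvGetB arr c (M - 2 - r) = pvGetB g (r + 1) c := by
    have := hcell (r + 1) c (by omega) (by omega); rw [← this]; congr 1; omega
  have e2 : pvGetB arr (c + 1) (M - 2 - r) = pvGetB g (r + 1) (c + 1) := by
    have := hcell (r + 1) (c + 1) (by omega) (by omega); rw [← this]; congr 1; omega
  have e3 : pvGetB arr c (M - 2 - r + 1) = pvGetB g r c := by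
    have := hcell r c (by omega) (by omega); rw [← this]; congr 1; omega
  have e4 : pvGetB arr (c + 1) (M - 2 - r + 1) = pvGetB g r (c + 1) := by
    have := hcell r (c + 1) (by omega) (by omega); rw [← this]; congr 1; omega
  simp only [pvSame, Bool.and_eq_true, bne_iff_ne, beq_iff_eq, pvCond, e1, e2, e3, e4]
  constructor
  · rintro ⟨⟨⟨h1, h2⟩, h3⟩, h4⟩
    refine ⟨?_, ?_, ?_, ?_⟩ <;> simp_all
  · rintro ⟨h1, h2, h3, h4⟩
    refine ⟨⟨⟨?_, ?_⟩, ?_⟩, ?_⟩ <;> simp_all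

theorem pv_wr_iff_marked (m n : Int) (M N : Nat) (hm : m = (M : Int)) (hn : n = (N : Int))
    (g arr : List (List Char)) (hRel : pvRel M N g arr) (i j : Nat) (hi : i < N) (hj : j < M) :
    ((i : Int), (j : Int)) ∈ pvWillRm m n arr ↔ pvMarked M N g (M - 1 - j) i = true := by
  rw [pv_mem_willRm m n M N hm hn, pv_marked_iff]
  constructor
  · rintro ⟨i', j', heq, i2, j2, hN2, hM2, hc, hi', hj'⟩
    obtain ⟨hii, hjj⟩ : i = i' ∧ j = j' := by
      simpa [Prod.ext_iff, Nat.cast_inj] using heq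
    subst hii hjj
    refine ⟨M - 2 - j2, i2, by omega, by omega, by omega, hN2, ?_⟩
    rw [pv_same_iff M N g arr hRel _ _ (by omega) hN2]
    have h2 : M - 2 - (M - 2 - j2) = j2 := by omega
    rw [h2]; exact hc
  · rintro ⟨r2, c2, hr2, hc2, hbM, hbN, hs⟩
    rw [pv_same_iff M N g arr hRel _ _ hbM hbN] at hs
    exact ⟨i, j, rfl, c2, M - 2 - r2, hbN, by omega, hs, by omega, by omega⟩

theorem pv_pair_cast_inj (q : Nat × Nat) (x y : Nat)
    (h : ((q.1 : Int), (q.2 : Int)) = ((x : Int), (y : Int))) : q = (x, y) := by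
  obtain ⟨a, b⟩ := q
  simp only [Prod.mk.injEq] at h ⊢
  exact ⟨by exact_mod_cast h.1, by exact_mod_cast h.2⟩

-- ---- A side: marking pass ----

theorem pv_mark_spec (N M : Nat) (L : List (Int × Int)) :
    ∀ (arr : List (List Char)) (count : Int), pvRect arr N M →
    (∀ p ∈ L, ∃ i j : Nat, p = ((i : Int), (j : Int)) ∧ i < N ∧ j < M) →
    pvRect (pvMark arr count L).1 N M ∧
    (∀ i j : Nat, i < N → j < M →
      pvGetB (pvMark arr count L).1 i j
        = if ((i : Int), (j : Int)) ∈ L then 'X' else pvGetB arr i j) ∧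
    (pvMark arr count L).2 = count +
      (((pvBoxA N M).filter (fun q =>
          decide (((q.1 : Int), (q.2 : Int)) ∈ L) && (pvGetB arr q.1 q.2 != 'X'))).length : Int) := by
  induction L with
  | nil =>
    intro arr count hRect hL
    refine ⟨hRect, ?_, ?_⟩
    · intro i j _ _; simp [pvMark]
    · simp [pvMark]
  | cons p L ih =>
    intro arr count hRect hL
    obtain ⟨x, y, rfl, hxN, hyM⟩ := hL p List.mem_cons_self
    have hrowlen : (arr.getD x []).length = M := by
      refine hRect.2 _ ?_
      rw [List.getD_eq_getElem?_getD, List.getElem?_eq_getElem (by rw [hRect.1]; omega), Option.getD_some]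
      exact List.getElem_mem _
    have hunf : ∀ (a : List (List Char)) (cnt : Int), a.length = N → (a.getD x []).length = M →
        pvMark a cnt (((x : Int), (y : Int)) :: L)
          = if pvGetB a x y ≠ 'X' then pvMark (a.set x ((a.getD x []).set y 'X')) (cnt + 1) L
            else pvMark a cnt L := by
      intro a cnt _ _
      show List.foldl _ _ _ = _
      rw [List.foldl_cons]
      simp only [pvIdx_natCast, PySem.List.pyGet?_natCast, pv_pySetD_natCast,
        ← List.getD_eq_getElem?_getD, pvMark]
      split <;> rfl
    have hbox : (pvBoxA N M).Nodup :=
      List.Nodup.product (List.nodup_range) (List.nodup_range)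
    have hmem_box : (x, y) ∈ pvBoxA N M := by
      simp [pvBoxA, List.mem_product, hxN, hyM]
    by_cases hX : pvGetB arr x y = 'X'
    · -- already removed: no change to state or count
      rw [hunf arr count hRect.1 hrowlen, if_neg (by simp [hX])]
      obtain ⟨ihR, ihC, ihN⟩ := ih arr count hRect (fun q hq => hL q (List.mem_cons_of_mem _ hq))
      refine ⟨ihR, ?_, ?_⟩
      · intro i j hi hj
        rw [ihC i j hi hj]
        by_cases hpe : ((i : Int), (j : Int)) = ((x : Int), (y : Int))
        · have hij : i = x ∧ j = y := by simpa [Prod.ext_iff, Nat.cast_inj] using hpe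
          obtain ⟨rfl, rfl⟩ := hij
          simp [hX, List.mem_cons]
        · simp only [List.mem_cons, hpe, false_or]
      · rw [ihN]
        have hfe : (pvBoxA N M).filter (fun q =>
              decide (((q.1 : Int), (q.2 : Int)) ∈ ((x : Int), (y : Int)) :: L)
                && (pvGetB arr q.1 q.2 != 'X'))
            = (pvBoxA N M).filter (fun q =>
              decide (((q.1 : Int), (q.2 : Int)) ∈ L) && (pvGetB arr q.1 q.2 != 'X')) := by
          apply List.filter_congr
          intro q hq
          by_cases hqa : q = (x, y)
          · subst hqa; simp [hX, List.mem_cons]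
          · have hmm : (((q.1 : Int), (q.2 : Int)) ∈ ((x : Int), (y : Int)) :: L)
                ↔ (((q.1 : Int), (q.2 : Int)) ∈ L) := by
              simp only [List.mem_cons, or_iff_right_iff_imp]
              intro h
              exact absurd (pv_pair_cast_inj q x y h) hqa
            simp [hmm]
        rw [hfe]
    · -- newly removed: cell becomes 'X', count goes up by one
      rw [hunf arr count hRect.1 hrowlen, if_pos hX]
      set arr' := arr.set x ((arr.getD x []).set y 'X') with harr'
      have hR' : pvRect arr' N M := by
        constructor
        · simp [harr', hRect.1]
        · intro row hrow
          rcases List.mem_or_eq_of_mem_set hrow with h | rfl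
          · exact hRect.2 _ h
          · simp only [List.length_set]; exact hrowlen
      have hcell' : ∀ i j : Nat, i < N → j < M →
          pvGetB arr' i j = if i = x ∧ j = y then 'X' else pvGetB arr i j := by
        intro i j hi hj
        by_cases hix : i = x
        · subst hix
          rw [pvGetB, pv_getD_set_self _ _ _ _ (by rw [hRect.1]; omega : i < arr.length)]
          by_cases hjy : j = y
          · subst hjy
            rw [pv_getD_set_self _ _ _ _ (by rw [hrowlen]; omega : j < (arr.getD i []).length)]
            simp
          · rw [pv_getD_set_ne _ _ _ _ _ (fun h => hjy h.symm)]
            simp [hjy, pvGetB]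
        · rw [pvGetB, pv_getD_set_ne _ _ _ _ _ (fun h => hix h.symm)]
          simp [hix, pvGetB]
      obtain ⟨ihR, ihC, ihN⟩ := ih arr' (count + 1) hR'
        (fun q hq => hL q (List.mem_cons_of_mem _ hq))
      refine ⟨ihR, ?_, ?_⟩
      · intro i j hi hj
        rw [ihC i j hi hj, hcell' i j hi hj]
        by_cases hpe : ((i : Int), (j : Int)) = ((x : Int), (y : Int))
        · have hij : i = x ∧ j = y := by simpa [Prod.ext_iff, Nat.cast_inj] using hpe
          obtain ⟨rfl, rfl⟩ := hij
          by_cases hmL : ((i : Int), (j : Int)) ∈ L <;> simp [hmL, List.mem_cons]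
        · have hij : ¬ (i = x ∧ j = y) := by
            rintro ⟨rfl, rfl⟩; exact hpe rfl
          simp only [List.mem_cons, hpe, false_or, if_neg hij]
      · rw [ihN]
        have hdiff : ((pvBoxA N M).filter (fun q =>
              decide (((q.1 : Int), (q.2 : Int)) ∈ ((x : Int), (y : Int)) :: L)
                && (pvGetB arr q.1 q.2 != 'X'))).length
            = ((pvBoxA N M).filter (fun q =>
              decide (((q.1 : Int), (q.2 : Int)) ∈ L)
                && (pvGetB arr' q.1 q.2 != 'X'))).length + 1 := by
          apply pv_countP_diff _ _ _ (x, y) hbox hmem_box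
          · simp [hX, List.mem_cons]
          · simp [hcell' x y hxN hyM]
          · intro b hb hba
            have hbN : b.1 < N ∧ b.2 < M := by
              have := List.mem_product.mp hb
              simpa [List.mem_range] using this
            have hbcell : pvGetB arr' b.1 b.2 = pvGetB arr b.1 b.2 := by
              rw [hcell' b.1 b.2 hbN.1 hbN.2, if_neg]
              rintro ⟨h1, h2⟩
              exact hba (Prod.ext h1 h2)
            have hbm : (((b.1 : Int), (b.2 : Int)) ∈ ((x : Int), (y : Int)) :: L)
                ↔ (((b.1 : Int), (b.2 : Int)) ∈ L) := by
              simp only [List.mem_cons, or_iff_right_iff_imp]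
              intro h
              exact absurd (pv_pair_cast_inj b x y h) hba
            simp [hbcell, hbm]
        rw [hdiff]
        push_cast
        ring

-- ---- A side: gravity ----

theorem pv_inner_grav (js : List Int) : ∀ (arr : List (List Char)) (i : Nat), i < arr.length →
    js.foldl (fun a j => if pvIdx a (i : Int) j = 'X'
      then PySem.List.pySetD a (i : Int)
             ((((PySem.List.pop? ((PySem.List.pyGet? a (i : Int)).getD []) j).map Prod.snd).getD
                 ((PySem.List.pyGet? a (i : Int)).getD [])) ++ ['X'])
      else a) arr
    = arr.set i (js.foldl pvColStep (arr.getD i [])) := by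
  induction js with
  | nil =>
    intro arr i hi
    rw [List.foldl_nil, List.foldl_nil, List.getD_eq_getElem?_getD,
      List.getElem?_eq_getElem hi, Option.getD_some, List.set_getElem_self hi]
  | cons j js ih =>
    intro arr i hi
    have hcol : (PySem.List.pyGet? arr (i : Int)).getD [] = arr.getD i [] := by
      rw [PySem.List.pyGet?_natCast, List.getD_eq_getElem?_getD]
    have hstep : (if pvIdx arr (i : Int) j = 'X'
        then PySem.List.pySetD arr (i : Int)
               ((((PySem.List.pop? ((PySem.List.pyGet? arr (i : Int)).getD []) j).map Prod.snd).getD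
                   ((PySem.List.pyGet? arr (i : Int)).getD [])) ++ ['X'])
        else arr) = arr.set i (pvColStep (arr.getD i []) j) := by
      rw [pvColStep, hcol, pvIdx, hcol]
      split
      · rw [pv_pySetD_natCast]
      · rw [List.getD_eq_getElem?_getD, List.getElem?_eq_getElem hi, Option.getD_some,
          List.set_getElem_self hi]
    rw [List.foldl_cons, List.foldl_cons, hstep, ih _ i (by simpa using hi),
      List.set_set, pv_getD_set_self _ _ _ _ hi]

theorem pv_col_grav (a b : List Char) :
    (PySem.List.pyRange ((a.length : Int) - 1) (-1) (-1)).foldl pvColStep (a ++ b)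
      = a.filter (· != 'X') ++ b ++ List.replicate (a.length - (a.filter (· != 'X')).length) 'X' := by
  induction a using List.reverseRecOn generalizing b with
  | nil => simp [PySem.List.pyRange_neg_one_eq_nil (by omega : (0:Int) - 1 ≤ -1)]
  | append_singleton a ch ih =>
    have hL : ((a ++ [ch]).length : Int) - 1 = (a.length : Int) := by simp
    rw [hL, PySem.List.pyRange_neg_one_cons (by omega : (-1:Int) < (a.length : Int)),
      List.foldl_cons]
    have hassoc : a ++ [ch] ++ b = a ++ ch :: b := by simp
    have hget : (PySem.List.pyGet? (a ++ ch :: b) ((a.length : Int))).getD ' ' = ch := by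
      rw [PySem.List.pyGet?_append_length, Option.getD_some]
    have hstep : pvColStep (a ++ [ch] ++ b) (a.length : Int)
        = if ch = 'X' then a ++ (b ++ ['X']) else a ++ ch :: b := by
      rw [pvColStep, hassoc, hget]
      split
      · rw [PySem.List.pop?_natCast _ _ (by simp), Option.map_some, Option.getD_some,
          pv_eraseIdx_mid]
        simp
      · rfl
    rw [hstep]
    by_cases hch : ch = 'X'
    · subst hch
      rw [if_pos rfl]
      have := ih (b ++ ['X'])
      rw [show a ++ (b ++ ['X']) = a ++ (b ++ ['X']) from rfl] at this
      rw [this]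
      have hfa : (a ++ ['X']).filter (· != 'X') = a.filter (· != 'X') := by simp
      have hle : (a.filter (· != 'X')).length ≤ a.length := List.length_filter_le _ _
      rw [hfa]
      simp only [List.length_append, List.length_singleton, List.append_assoc]
      congr 1
      rw [show a.length + 1 - (List.filter (fun x => x != 'X') a).length
          = (a.length - (List.filter (fun x => x != 'X') a).length) + 1 by omega,
        List.replicate_succ]
      simp
    · rw [if_neg hch, show a ++ ch :: b = a ++ ([ch] ++ b) by simp, ih ([ch] ++ b)]
      have hfa : (a ++ [ch]).filter (· != 'X') = a.filter (· != 'X') ++ [ch] := by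
        simp [List.filter_append, hch]
      rw [hfa]
      simp only [List.length_append, List.length_singleton, List.append_assoc]
      congr 2
      all_goals simp

theorem pv_outer_grav (m n : Int) (k : Nat) : ∀ (arr : List (List Char)), k ≤ arr.length →
    (PySem.List.pyRange ((k : Int) - 1) (-1) (-1)).foldl (fun arr i =>
      (PySem.List.pyRange (m-1) (-1) (-1)).foldl (fun arr j =>
        if pvIdx arr i j = 'X'
        then PySem.List.pySetD arr i
               ((((PySem.List.pop? ((PySem.List.pyGet? arr i).getD []) j).map Prod.snd).getD
                   ((PySem.List.pyGet? arr i).getD [])) ++ ['X'])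
        else arr) arr) arr
    = (arr.take k).map (fun col => (PySem.List.pyRange (m-1) (-1) (-1)).foldl pvColStep col)
        ++ arr.drop k := by
  induction k with
  | zero =>
    intro arr _
    rw [show ((0:Nat):Int) - 1 = (-1:Int) by simp,
      PySem.List.pyRange_neg_one_eq_nil (by omega : (-1:Int) ≤ -1)]
    simp
  | succ k ih =>
    intro arr hk
    have hkl : k < arr.length := by omega
    have hcons : ((k + 1 : Nat) : Int) - 1 = (k : Int) := by push_cast; ring
    rw [hcons, PySem.List.pyRange_neg_one_cons (by omega : (-1:Int) < (k : Int)), List.foldl_cons,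
      pv_inner_grav _ arr k hkl]
    set v := (PySem.List.pyRange (m-1) (-1) (-1)).foldl pvColStep (arr.getD k []) with hv
    rw [ih (arr.set k v) (by simp; omega)]
    have htake : (arr.set k v).take k = arr.take k := by
      rw [List.take_set, List.set_eq_of_length_le (by simp)]
    have hdrop : (arr.set k v).drop k
        = v :: arr.drop (k + 1) := by
      rw [List.drop_set, if_neg (by omega), Nat.sub_self,
        List.drop_eq_getElem_cons hkl, List.set_cons_zero]
    have hget : arr.getD k [] = arr[k] := List.getD_eq_getElem _ _ hkl
    rw [htake, hdrop]
    simp only [List.take_add_one, List.getElem?_map, List.getElem?_eq_getElem hkl,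
      Option.map_some, Option.toList_some, List.map_append, List.map_cons, List.map_nil,
      List.append_assoc, List.cons_append, List.nil_append]
    rw [hv, hget]

theorem pv_grav_eq (m n : Int) (M N : Nat) (hm : m = (M : Int)) (hn : n = (N : Int))
    (arr : List (List Char)) (hRect : pvRect arr N M) :
    pvGrav m n arr = arr.map (fun col =>
      col.filter (· != 'X') ++ List.replicate (M - (col.filter (· != 'X')).length) 'X') := by
  have hlen : arr.length = N := hRect.1
  have h1 : pvGrav m n arr
      = (arr.take N).map (fun col => (PySem.List.pyRange (m-1) (-1) (-1)).foldl pvColStep col)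
          ++ arr.drop N := by
    rw [pvGrav, ← pv_outer_grav m n N arr (by omega)]
    rw [hn]
  rw [h1, List.take_of_length_le (by omega), List.drop_of_length_le (by omega), List.append_nil]
  apply List.map_congr_left
  intro col hcol
  have hclen : col.length = M := hRect.2 _ hcol
  have hm1 : m - 1 = (col.length : Int) - 1 := by rw [hclen, hm]
  have hc := pv_col_grav col []
  simp only [List.append_nil] at hc
  rw [hm1, hc, hclen]

-- ---- B side: totals ----

theorem pv_marks_getD (M N : Nat) (g : List (List Char)) (r c : Nat) (hr : r < M) (hc : c < N) :
    ((pvMarks M N g).getD r []).getD c false = pvMarked M N g r c := by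
  simp [pvMarks, List.getD_eq_getElem?_getD, List.getElem?_range, hr, hc]

theorem pv_totalB (M N : Nat) (g : List (List Char)) :
    ((pvMarks M N g).map (fun row => row.count true)).sum
      = ((pvBoxA M N).filter (fun q => pvMarked M N g q.1 q.2)).length := by
  have hbox : pvBoxA M N = (List.range M).flatMap (fun r => (List.range N).map (Prod.mk r)) := rfl
  rw [pvMarks, hbox, List.filter_flatMap, List.length_flatMap, List.map_map]
  congr 1
  apply List.map_congr_left
  intro r _
  simp only [Function.comp_apply, Function.comp_def]
  rw [List.filter_map]
  simp only [List.length_map, Function.comp_def]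
  rw [List.count_eq_countP, List.countP_map]
  simp [Function.comp_def, List.countP_eq_length_filter]

theorem pv_count_eq (m n : Int) (M N : Nat) (hm : m = (M : Int)) (hn : n = (N : Int))
    (g arr : List (List Char)) (hRel : pvRel M N g arr) :
    ((pvBoxA N M).filter (fun q =>
        decide (((q.1 : Int), (q.2 : Int)) ∈ pvWillRm m n arr) && (pvGetB arr q.1 q.2 != 'X'))).length
      = ((pvBoxA M N).filter (fun q => pvMarked M N g q.1 q.2)).length := by
  have h1 : (pvBoxA N M).filter (fun q =>
        decide (((q.1 : Int), (q.2 : Int)) ∈ pvWillRm m n arr) && (pvGetB arr q.1 q.2 != 'X'))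
      = (pvBoxA N M).filter (fun q =>
        pvMarked M N g (M - 1 - q.2) q.1) := by
    apply List.filter_congr
    intro q hq
    have hqb : q.1 < N ∧ q.2 < M := by
      have := List.mem_product.mp hq
      simpa [List.mem_range] using this
    have hiff := pv_wr_iff_marked m n M N hm hn g arr hRel q.1 q.2 hqb.1 hqb.2
    by_cases hmemb : ((q.1 : Int), (q.2 : Int)) ∈ pvWillRm m n arr
    · have hnX : pvGetB arr q.1 q.2 ≠ 'X' := by
        obtain ⟨i, j, heq, hblk⟩ := (pv_mem_willRm m n M N hm hn arr _).mp hmemb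
        have hqe : q = (i, j) := pv_pair_cast_inj q i j heq
        rw [hqe]
        exact pv_inBlock_nonX M N arr i j hblk
      simp [hmemb, hnX, hiff.mp hmemb]
    · have : pvMarked M N g (M - 1 - q.2) q.1 ≠ true := fun h => hmemb (hiff.mpr h)
      simp [hmemb, Bool.eq_false_iff.mpr this]
  rw [h1]
  have hnodA : (pvBoxA N M).Nodup := List.Nodup.product List.nodup_range List.nodup_range
  have hnodB : (pvBoxA M N).Nodup := List.Nodup.product List.nodup_range List.nodup_range
  have hmapnod : ((pvBoxA N M).map (fun q => (M - 1 - q.2, q.1))).Nodup := by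
    apply List.Nodup.map_on _ hnodA
    intro x hx y hy hxy
    have hxb : x.1 < N ∧ x.2 < M := by
      have := List.mem_product.mp hx; simpa [List.mem_range] using this
    have hyb : y.1 < N ∧ y.2 < M := by
      have := List.mem_product.mp hy; simpa [List.mem_range] using this
    have h1' := congrArg Prod.fst hxy
    have h2' := congrArg Prod.snd hxy
    simp only [] at h1' h2'
    have : x.1 = y.1 ∧ x.2 = y.2 := ⟨h2', by omega⟩
    exact Prod.ext this.1 this.2
  have hmemA : ∀ (a b : Nat), ((a, b) ∈ pvBoxA N M) ↔ (a < N ∧ b < M) := fun a b => by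
    simp [pvBoxA, List.mem_product]
  have hmemB : ∀ (a b : Nat), ((a, b) ∈ pvBoxA M N) ↔ (a < M ∧ b < N) := fun a b => by
    simp [pvBoxA, List.mem_product]
  have hperm : ((pvBoxA N M).map (fun q => (M - 1 - q.2, q.1))).Perm (pvBoxA M N) := by
    rw [List.perm_ext_iff_of_nodup hmapnod hnodB]
    rintro ⟨r, c⟩
    rw [List.mem_map, hmemB r c]
    constructor
    · rintro ⟨⟨a, b⟩, hab, heq⟩
      have hb := (hmemA a b).mp hab
      have h1' := congrArg Prod.fst heq
      have h2' := congrArg Prod.snd heq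
      simp only [] at h1' h2'
      exact ⟨by omega, by omega⟩
    · rintro ⟨hrM, hcN⟩
      refine ⟨(c, M - 1 - r), (hmemA _ _).mpr ⟨hcN, by omega⟩, ?_⟩
      have he : M - 1 - (M - 1 - r) = r := by omega
      simp [he]
  calc ((pvBoxA N M).filter (fun q => pvMarked M N g (M - 1 - q.2) q.1)).length
      = (((pvBoxA N M).filter (fun q => pvMarked M N g (M - 1 - q.2) q.1)).map
          (fun q => (M - 1 - q.2, q.1))).length := by rw [List.length_map]
    _ = (((pvBoxA N M).map (fun q => (M - 1 - q.2, q.1))).filter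
          (fun q => pvMarked M N g q.1 q.2)).length := by rw [List.filter_map]; rfl
    _ = ((pvBoxA M N).filter (fun q => pvMarked M N g q.1 q.2)).length :=
        (hperm.filter _).length_eq

theorem pv_empty_iff (m n : Int) (M N : Nat) (hm : m = (M : Int)) (hn : n = (N : Int))
    (g arr : List (List Char)) (hRel : pvRel M N g arr) :
    (pvWillRm m n arr = []) ↔ ((pvMarks M N g).map (fun row => row.count true)).sum = 0 := by
  rw [pv_willRm_nil m n M N hm hn arr, pv_totalB, List.length_eq_zero_iff,
    List.filter_eq_nil_iff]
  constructor
  · intro h q hq hmq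
    obtain ⟨r2, c2, _, _, hbM, hbN, hs⟩ := (pv_marked_iff M N g q.1 q.2).mp hmq
    rw [pv_same_iff M N g arr hRel _ _ hbM hbN] at hs
    exact h ⟨c2, M - 2 - r2, hbN, by omega, hs⟩
  · rintro h ⟨i2, j2, hN2, hM2, hc⟩
    have hsame : pvSame g (M - 2 - j2) i2 = true := by
      rw [pv_same_iff M N g arr hRel _ _ (by omega) hN2]
      have he : M - 2 - (M - 2 - j2) = j2 := by omega
      rw [he]; exact hc
    refine h (M - 2 - j2, i2) ?_ ?_
    · simp only [pvBoxA, List.mem_product, List.mem_range]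
      exact ⟨by omega, by omega⟩
    · exact (pv_marked_iff M N g _ _).mpr ⟨M - 2 - j2, i2, Or.inl rfl, Or.inl rfl, by omega, hN2, hsame⟩

-- ---- one round preserves the relation ----

theorem pv_kept_eq (M N : Nat) (g : List (List Char)) (c : Nat) (hc : c < N) :
    pvKept M g (pvMarks M N g) c
      = ((List.range M).filter (fun r =>
            (pvGetB g r c != 'X') && !pvMarked M N g r c)).map (fun r => pvGetB g r c) := by
  rw [pvKept, pv_filterMap_if]
  congr 1
  apply List.filter_congr
  intro r hr
  have hrM : r < M := List.mem_range.mp hr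
  rw [pv_marks_getD M N g r c hrM hc]
  by_cases h1 : pvGetB g r c = 'X' <;> by_cases h2 : pvMarked M N g r c = true <;>
    simp [h1, h2]

theorem pv_rel_step (m n : Int) (M N : Nat) (hm : m = (M : Int)) (hn : n = (N : Int))
    (g arr : List (List Char)) (hRel : pvRel M N g arr) (count : Int) :
    pvRel M N (pvStepB M N g (pvMarks M N g))
      (pvGrav m n (pvMark arr count (pvWillRm m n arr)).1) := by
  have hg := hRel.1
  have ha := hRel.2.1
  have hcell := hRel.2.2
  have hLbox : ∀ p ∈ pvWillRm m n arr, ∃ i j : Nat, p = ((i:Int), (j:Int)) ∧ i < N ∧ j < M := by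
    intro p hp
    obtain ⟨i, j, rfl, i2, j2, hN2, hM2, _, hi, hj⟩ := (pv_mem_willRm m n M N hm hn arr p).mp hp
    exact ⟨i, j, rfl, by omega, by omega⟩
  obtain ⟨hR2, hC2, _⟩ := pv_mark_spec N M (pvWillRm m n arr) arr count ha hLbox
  set arr2 := (pvMark arr count (pvWillRm m n arr)).1 with harr2
  have hcell2 : ∀ i j, i < N → j < M →
      pvGetB arr2 i j = if pvMarked M N g (M-1-j) i = true then 'X' else pvGetB arr i j := by
    intro i j hi hj
    rw [hC2 i j hi hj]
    by_cases hmb : ((i:Int),(j:Int)) ∈ pvWillRm m n arr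
    · rw [if_pos hmb, if_pos ((pv_wr_iff_marked m n M N hm hn g arr hRel i j hi hj).mp hmb)]
    · rw [if_neg hmb,
        if_neg (fun h => hmb ((pv_wr_iff_marked m n M N hm hn g arr hRel i j hi hj).mpr h))]
  have hgrav := pv_grav_eq m n M N hm hn arr2 hR2
  -- the kept cells of column c, top to bottom
  set K : Nat → List Char := fun c => ((List.range M).filter (fun r =>
      (pvGetB g r c != 'X') && !pvMarked M N g r c)).map (fun r => pvGetB g r c) with hK
  have hkLe : ∀ c, (K c).length ≤ M := by
    intro c
    rw [hK]
    simp only [List.length_map]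
    calc ((List.range M).filter _).length ≤ (List.range M).length := List.length_filter_le _ _
      _ = M := List.length_range
  have hfilter : ∀ c, c < N → ((arr2.getD c []).filter (· != 'X')) = (K c).reverse := by
    intro c hc
    rw [pv_row_eq arr2 N M hR2 c hc, List.filter_map]
    simp only [hK]
    rw [← List.map_reverse, ← List.filter_reverse, pv_reverse_range, List.filter_map,
      List.map_map]
    have hPP : (List.range M).filter ((fun x => x != 'X') ∘ fun j => pvGetB arr2 c j)
        = (List.range M).filter ((fun r => (pvGetB g r c != 'X') && !pvMarked M N g r c)
            ∘ fun k => M - 1 - k) := by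
      apply List.filter_congr
      intro j hj
      have hjM : j < M := List.mem_range.mp hj
      have hac : pvGetB arr c j = pvGetB g (M-1-j) c := by
        have := hcell (M-1-j) c (by omega) hc
        rw [← this]
        congr 1
        omega
      simp only [Function.comp_apply, hcell2 c j hc hjM, hac]
      by_cases hmk : pvMarked M N g (M-1-j) c = true <;> simp [hmk]
    rw [hPP]
    apply List.map_congr_left
    intro j hj
    have hjm := List.mem_filter.mp hj
    have hjM : j < M := List.mem_range.mp hjm.1
    have hnm : pvMarked M N g (M-1-j) c ≠ true := by
      have := hjm.2
      simp only [Function.comp_apply, Bool.and_eq_true, Bool.not_eq_true'] at this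
      simp [this.2]
    have hac : pvGetB arr c j = pvGetB g (M-1-j) c := by
      have := hcell (M-1-j) c (by omega) hc
      rw [← this]
      congr 1
      omega
    simp only [Function.comp_apply, hcell2 c j hc hjM, if_neg hnm, hac]
  -- shapes and cells of the new B grid
  have hnewg : ∀ r c, r < M → c < N →
      pvGetB (pvStepB M N g (pvMarks M N g)) r c
        = (List.replicate (M - (K c).length) 'X' ++ K c).getD r ' ' := by
    intro r c hr hc
    simp only [pvStepB, pvGetB]
    rw [PySem.List.getD_map_range _ _ _ _ hr, PySem.List.getD_map_range _ _ _ _ hc,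
      PySem.List.getD_map_range _ _ _ _ hc, pv_kept_eq M N g c hc, hK]
  -- the new arr columns
  have hnewa : ∀ c, c < N →
      (pvGrav m n arr2).getD c []
        = (K c).reverse ++ List.replicate (M - (K c).length) 'X' := by
    intro c hc
    have hc2 : c < arr2.length := by rw [hR2.1]; omega
    rw [hgrav, List.getD_eq_getElem?_getD, List.getElem?_map, List.getElem?_eq_getElem hc2]
    simp only [Option.map_some, Option.getD_some]
    rw [show arr2[c] = arr2.getD c [] from (List.getD_eq_getElem arr2 [] hc2).symm,
      hfilter c hc]
    congr 2
    rw [List.length_reverse]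
  refine ⟨?_, ?_, ?_⟩
  · -- Rect of the new grid
    constructor
    · rw [pvStepB]
      simp
    · intro row hrow
      simp only [pvStepB, List.mem_map] at hrow
      obtain ⟨r, _, rfl⟩ := hrow
      simp
  · constructor
    · rw [hgrav]
      simp [hR2.1]
    · intro row hrow
      rw [hgrav] at hrow
      simp only [List.mem_map] at hrow
      obtain ⟨col, hcol, rfl⟩ := hrow
      have hclen : col.length = M := hR2.2 _ hcol
      have hfl : (col.filter (· != 'X')).length ≤ M := by
        calc (col.filter (· != 'X')).length ≤ col.length := List.length_filter_le _ _
          _ = M := hclen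
      simp only [List.length_append, List.length_replicate]
      omega
  · intro r c hr hc
    rw [hnewg r c hr hc, pvGetB, hnewa c hc]
    have hkM : (K c).length ≤ M := hkLe c
    by_cases hcase : r < M - (K c).length
    · rw [List.getD_append _ _ _ r (by simp only [List.length_replicate]; omega),
        List.getD_replicate _ (by omega)]
      rw [List.getD_eq_getElem?_getD, List.getElem?_append,
        if_neg (by simp only [List.length_reverse]; omega)]
      rw [List.length_reverse, List.getElem?_replicate, if_pos (by omega)]
      simp
    · have hk1 : 1 ≤ (K c).length := by omega
      have hlt1 : M - 1 - r < (K c).reverse.length := by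
        simp only [List.length_reverse]; omega
      rw [List.getD_eq_getElem?_getD, List.getElem?_append, if_pos hlt1,
        List.getElem?_eq_getElem hlt1, Option.getD_some, List.getElem_reverse]
      have hlt2 : r - (List.replicate (M - (K c).length) 'X').length < (K c).length := by
        simp only [List.length_replicate]; omega
      rw [List.getD_eq_getElem?_getD, List.getElem?_append,
        if_neg (by simp only [List.length_replicate]; omega),
        List.getElem?_eq_getElem hlt2, Option.getD_some]
      have heq : (K c).length - 1 - (M - 1 - r)
          = r - (List.replicate (M - (K c).length) 'X').length := by
        simp only [List.length_replicate]; omega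
      simp only [heq]

-- ---- the loops agree ----

theorem pv_loop_eq (m n : Int) (M N : Nat) (hm : m = (M : Int)) (hn : n = (N : Int)) :
    ∀ (fuel : Nat) (g arr : List (List Char)) (count : Int), pvRel M N g arr →
      pvLoopA m n fuel arr count = pvLoopB M N fuel g count := by
  intro fuel
  induction fuel with
  | zero => intro g arr count _; rfl
  | succ fuel ih =>
    intro g arr count hRel
    by_cases hw : pvWillRm m n arr = []
    · have htot := (pv_empty_iff m n M N hm hn g arr hRel).mp hw
      simp [pvLoopA, pvLoopB, hw, htot]
    · have htot : ((pvMarks M N g).map (fun row => row.count true)).sum ≠ 0 :=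
        fun h => hw ((pv_empty_iff m n M N hm hn g arr hRel).mpr h)
      have hLbox : ∀ p ∈ pvWillRm m n arr,
          ∃ i j : Nat, p = ((i:Int), (j:Int)) ∧ i < N ∧ j < M := by
        intro p hp
        obtain ⟨i, j, rfl, i2, j2, hN2, hM2, _, hi, hj⟩ :=
          (pv_mem_willRm m n M N hm hn arr p).mp hp
        exact ⟨i, j, rfl, by omega, by omega⟩
      obtain ⟨_, _, hcnt⟩ := pv_mark_spec N M (pvWillRm m n arr) arr count hRel.2.1 hLbox
      have hcnt2 : (pvMark arr count (pvWillRm m n arr)).2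
          = count + ((((pvMarks M N g).map (fun row => row.count true) : List Nat).sum : Nat) : Int) := by
        rw [hcnt, pv_count_eq m n M N hm hn g arr hRel, pv_totalB]
      simp only [pvLoopA, pvLoopB, if_neg hw, if_neg htot]
      rw [hcnt2]
      exact ih _ _ _ (pv_rel_step m n M N hm hn g arr hRel count)

-- ---- initial states ----

theorem pv_init_rel (m n : Int) (board : List String) (M N : Nat)
    (hm : m = (M : Int)) (hn : n = (N : Int))
    (hb : M ≤ board.length) (hlen : ∀ s ∈ board.take M, (n : Int) ≤ (s.toList.length : Int)) :
    pvRel M N ((board.take M).map fun row => row.toList.take N) (pvBuildArr m n board) := by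
  have hbuild : pvBuildArr m n board = (List.range N).map
      (fun (i : Nat) => ((List.range M).map
        (fun (j : Nat) => pvRowGet board (j : Int) (i : Int))).reverse) := by
    rw [pvBuildArr]
    simp only [PySem.List.foldl_append_singleton_eq_map, List.nil_append]
    rw [hm, hn, PySem.List.pyRange_zero_nat, PySem.List.pyRange_zero_nat]
    simp only [List.map_map]
    rfl
  have hrowN : ∀ s ∈ board.take M, N ≤ s.toList.length := by
    intro s hs
    have := hlen s hs
    omega
  refine ⟨⟨?_, ?_⟩, ⟨?_, ?_⟩, ?_⟩
  · simp [List.length_take]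
    omega
  · intro row hrow
    simp only [List.mem_map] at hrow
    obtain ⟨s, hs, rfl⟩ := hrow
    simp only [List.length_take]
    have := hrowN s hs
    omega
  · simp [hbuild]
  · intro row hrow
    rw [hbuild] at hrow
    simp only [List.mem_map] at hrow
    obtain ⟨i, _, rfl⟩ := hrow
    simp
  · intro r c hr hc
    rw [hbuild, pvGetB, PySem.List.getD_map_range _ _ _ _ hc]
    have hlrev : ((List.range M).map
        (fun (j : Nat) => pvRowGet board (j : Int) (c : Int))).reverse.length = M := by simp
    have hidx : M - 1 - r < M := by omega
    rw [List.getD_eq_getElem _ _ (by rw [hlrev]; exact hidx), List.getElem_reverse]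
    simp only [List.length_map, List.length_range, List.getElem_map, List.getElem_range]
    have hrew : M - 1 - (M - 1 - r) = r := by omega
    rw [hrew]
    -- left side is now board[r][c] read through A's primitives
    have hrb : r < board.length := by omega
    have hrowget : pvRowGet board (r : Int) (c : Int) = board[r].toList.getD c ' ' := by
      rw [pvRowGet, PySem.List.pyGet?_natCast, List.getElem?_eq_getElem hrb, Option.getD_some,
        PySem.Str.pyGet?_natCast, List.getD_eq_getElem?_getD]
    have hrt : r < (board.take M).length := by
      simp only [List.length_take]
      omega
    have hmemtake : board[r] ∈ board.take M := by
      have he : (board.take M)[r] = board[r] := List.getElem_take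
      rw [← he]
      exact List.getElem_mem hrt
    have hcl : c < board[r].toList.length := by
      have := hrowN board[r] hmemtake
      omega
    have hg0 : pvGetB ((board.take M).map fun row => row.toList.take N) r c
        = board[r].toList[c]?.getD ' ' := by
      rw [pvGetB, List.getD_eq_getElem?_getD, List.getD_eq_getElem?_getD, List.getElem?_map,
        List.getElem?_take, if_pos hr, List.getElem?_eq_getElem hrb]
      simp only [Option.map_some, Option.getD_some]
      rw [List.getElem?_take, if_pos hc]
    rw [hrowget, hg0, List.getD_eq_getElem?_getD]

-- ===== VERDICT (by name: the statement is the Claim_ definition above) =====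
theorem solution_spec : Claim_equal_solution := by
  intro m n board _ hpre
  simp only [Spec_solution, solution, solution_alt]
  by_cases hn0 : n ≤ 0
  · -- no columns are ever read: both games are over immediately
    have hN : n.toNat = 0 := by omega
    have hwr : pvWillRm m n (pvBuildArr m n board) = [] := by
      rw [pv_willRm_flat, PySem.List.pyRange_one_eq_nil (by omega : n - 1 ≤ 0)]
      rfl
    have hnn : (((board.take m.toNat).map fun row => row.toList.take n.toNat).headD []).length
        = 0 := by
      cases hbt : board.take m.toNat with
      | nil => simp
      | cons s t => simp [hN]
    rw [hnn]
    simp [pvLoopA, pvLoopB, pvMarks, hwr]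
  · by_cases hm0 : m ≤ 0
    · -- no rows: again both games are over immediately
      have hM : m.toNat = 0 := by omega
      have hwr : pvWillRm m n (pvBuildArr m n board) = [] := by
        rw [pv_willRm_flat, PySem.List.pyRange_one_eq_nil (by omega : m - 1 ≤ 0)]
        simp
      simp [pvLoopA, pvLoopB, pvMarks, hwr, hM]
    · -- the real game: the two simulations run in lockstep
      have hm' : m = (m.toNat : Int) := (Int.toNat_of_nonneg (by omega)).symm
      have hn' : n = (n.toNat : Int) := (Int.toNat_of_nonneg (by omega)).symm
      obtain ⟨hb, hlen⟩ := hpre (by omega)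
      have hinit := pv_init_rel m n board m.toNat n.toNat hm' hn' hb hlen
      have hlg : ((board.take m.toNat).map fun row => row.toList.take n.toNat).length
          = m.toNat := by
        simp only [List.length_map, List.length_take]
        omega
      have hnn : (((board.take m.toNat).map fun row => row.toList.take n.toNat).headD
          []).length = n.toNat := by
        cases hbt : board.take m.toNat with
        | nil =>
          exfalso
          have := congrArg List.length hbt
          simp only [List.length_take, List.length_nil] at this
          omega
        | cons s t =>
          simp only [List.map_cons, List.headD_cons, List.length_take]
          have hsmem : s ∈ board.take m.toNat := by rw [hbt]; exact List.mem_cons_self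
          have := hlen s hsmem
          omega
      rw [hlg, hnn]
      exact pv_loop_eq m n m.toNat n.toNat hm' hn' (m.toNat * n.toNat + 1) _ _ 0 hinit
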